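-- pv_equiv track=rewrite | github.com/walidroid/PythonCode | estnum.py | estnum
-- ===== SOURCE A (Python) =====
-- def estnum(ch):
--     res=True
--     for i in range(len(ch)):
--         if ch[i] in "0123456789" :
--             res=res & True
--
--         else:
--             res=False
--     return res
-- ===== SOURCE B (Python) =====
-- def estnum(ch):
--     return set(ch) <= set("0123456789")
-- ===== Notes on version B (the rewrite author's own statement) =====
-- stated objective: idiomatic
-- what changed: Replaced the per-index boolean-flag loop with building the set of distinct characters once and testing subset-ness against the digit set.
import Mathlib
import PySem

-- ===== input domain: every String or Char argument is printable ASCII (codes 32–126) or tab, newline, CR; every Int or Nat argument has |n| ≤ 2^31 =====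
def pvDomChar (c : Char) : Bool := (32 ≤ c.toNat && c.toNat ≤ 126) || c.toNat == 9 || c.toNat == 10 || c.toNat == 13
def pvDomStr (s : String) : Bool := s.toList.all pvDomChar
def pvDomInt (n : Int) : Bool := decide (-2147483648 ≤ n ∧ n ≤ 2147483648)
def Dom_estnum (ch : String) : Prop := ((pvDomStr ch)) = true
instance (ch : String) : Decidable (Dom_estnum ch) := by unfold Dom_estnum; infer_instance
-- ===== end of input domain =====

-- B replaces A's per-index boolean-flag loop with one set construction plus a subset test (idiomatic).

-- ===== PORT A =====
def estnum (ch : String) : Bool :=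
  (PySem.List.pyRange 0 (PySem.Str.len ch) 1).foldl
    (fun res i =>
      if ((PySem.Str.pyGet? ch i).getD ' ') ∈ "0123456789".toList then res && true
      else false) true

-- ===== PORT B =====
def estnum_alt (ch : String) : Bool :=
  PySem.Set.issubset (PySem.Set.ofList ch.toList) "0123456789".toList

-- ===== PRECONDITION & SPEC =====
def Spec_estnum (ch : String) (out : Bool) : Prop := out = estnum_alt ch
instance (ch : String) (out : Bool) : Decidable (Spec_estnum ch out) := by unfold Spec_estnum; infer_instance

-- ===== CLAIM (what is proved, stated in full; the proofs are below) =====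
def Claim_equal_estnum : Prop := ∀ (ch : String), Dom_estnum ch → Spec_estnum ch (estnum ch)

-- ===== LEMMAS AND PROOFS =====

-- the flag loop computes 'all characters are digits', with any initial flag b
theorem pvFoldFlag (D : List Char) (l : List Char) (b : Bool) :
    l.foldl (fun res c => if c ∈ D then res && true else false) b
      = (b && l.all (fun c => decide (c ∈ D))) := by
  induction l generalizing b with
  | nil => simp
  | cons c l ih =>
    simp only [List.foldl_cons, List.all_cons, ih]
    by_cases h : c ∈ D <;> simp [h]

theorem pvSubsetAll (D : List Char) (l : List Char) :
    PySem.Set.issubset (PySem.Set.ofList l) D = l.all (fun c => decide (c ∈ D)) := by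
  rw [Bool.eq_iff_iff, PySem.Set.issubset_iff, List.all_eq_true]
  constructor
  · intro h x hx; simpa using h x (by simpa [PySem.Set.mem_ofList] using hx)
  · intro h x hx; simpa using h x (by simpa [PySem.Set.mem_ofList] using hx)

-- ===== VERDICT (by name: the statement is the Claim_ definition above) =====
theorem estnum_spec : Claim_equal_estnum := by
  intro ch _
  unfold Spec_estnum estnum estnum_alt
  rw [pvSubsetAll]
  have h : (PySem.List.pyRange 0 (PySem.Str.len ch) 1).foldl
      (fun res i =>
        if ((PySem.Str.pyGet? ch i).getD ' ') ∈ "0123456789".toList then res && true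
        else false) true
      = ch.toList.foldl (fun res c => if c ∈ "0123456789".toList then res && true else false) true := by
    rw [PySem.Str.len_eq]
    have := PySem.List.foldl_pyRange_zero_pyGetD ch.toList ' '
      (fun res c => if c ∈ "0123456789".toList then res && true else false) true
    rw [← this]
    apply PySem.List.foldl_congr_mem
    intro acc i hi
    have hmem := (PySem.List.mem_pyRange_one).1 hi
    simp only [PySem.List.pyGetD]
    rfl
  rw [h, pvFoldFlag]
  simp
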